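-- pv_equiv track=rewrite | github.com/hahnbanach/mrcall-desktop | engine/scripts/migrate_profile_to_uid.py | _patch_env_lines
-- ===== SOURCE A (Python) =====
-- from typing import List, Tuple
--
-- _NEEDS_QUOTE = set(" \t\n\r\"'\\#=$`")
--
-- def _quote(value: str) -> str:
--     """Match the engine's settings_io._quote behaviour (double-quote on
--     any special character, plain otherwise)."""
--     if value == "":
--         return ""
--     if any(ch in _NEEDS_QUOTE for ch in value):
--         escaped = (
--             value.replace("\\", "\\\\")
--             .replace('"', '\\"')
--             .replace("\r\n", "\\n")
--             .replace("\n", "\\n")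
--             .replace("\r", "\\n")
--         )
--         return f'"{escaped}"'
--     return value
--
-- def _patch_env_lines(lines: List[str], updates: List[Tuple[str, str]]) -> List[str]:
--     """Rewrite or append KEY=value pairs.
--
--     For each (key, value) in `updates`: if a `KEY=...` line already
--     exists (ignoring comments / blanks), replace it in place. Otherwise
--     append at the bottom in the order given. Trailing newline always
--     enforced.
--     """
--     pending = {k: v for k, v in updates}
--     out: List[str] = []
--     for raw in lines:
--         stripped = raw.strip()
--         if not stripped or stripped.startswith("#") or "=" not in stripped:
--             out.append(raw)
--             continue
--         key = stripped.split("=", 1)[0].strip()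
--         if key in pending:
--             out.append(f"{key}={_quote(pending.pop(key))}\n")
--         else:
--             out.append(raw)
--     if out and not out[-1].endswith("\n"):
--         out[-1] = out[-1] + "\n"
--     if pending:
--         if out and out[-1].strip() != "":
--             out.append(f"# Added by migrate_profile_to_uid.py\n")
--         for key, value in pending.items():
--             out.append(f"{key}={_quote(value)}\n")
--     return out
-- ===== SOURCE B (Python) =====
-- from typing import List, Tuple, Optional
--
-- _NEEDS_QUOTE = set(" \t\n\r\"'\\#=$`")
--
-- def _quote(value: str) -> str:
--     if value == "":
--         return ""
--     if any(ch in _NEEDS_QUOTE for ch in value):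
--         escaped = (
--             value.replace("\\", "\\\\")
--             .replace('"', '\\"')
--             .replace("\r\n", "\\n")
--             .replace("\n", "\\n")
--             .replace("\r", "\\n")
--         )
--         return f'"{escaped}"'
--     return value
--
-- def _env_key(raw: str) -> Optional[str]:
--     """Key of a KEY=... line, or None for comments/blanks/lines without '='."""
--     stripped = raw.strip()
--     if not stripped or stripped.startswith("#") or "=" not in stripped:
--         return None
--     return stripped.split("=", 1)[0].strip()
--
-- def _patch_env_lines(lines: List[str], updates: List[Tuple[str, str]]) -> List[str]:
--     upd = dict(updates)
--     # pass 1: first line index of each key to be updated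
--     firstidx = {}
--     for i, raw in enumerate(lines):
--         k = _env_key(raw)
--         if k is not None and k in upd and k not in firstidx:
--             firstidx[k] = i
--     # pass 2: rebuild, substituting exactly at the recorded positions
--     out = []
--     for i, raw in enumerate(lines):
--         k = _env_key(raw)
--         if k is not None and firstidx.get(k) == i:
--             out.append(f"{k}={_quote(upd[k])}\n")
--         else:
--             out.append(raw)
--     if out and not out[-1].endswith("\n"):
--         out[-1] = out[-1] + "\n"
--     missing = [(k, v) for k, v in upd.items() if k not in firstidx]
--     if missing:
--         if out and out[-1].strip() != "":
--             out.append("# Added by migrate_profile_to_uid.py\n")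
--         for k, v in missing:
--             out.append(f"{k}={_quote(v)}\n")
--     return out
-- ===== Notes on version B (the rewrite author's own statement) =====
-- stated objective: alternative
-- what changed: Replaces A's single pass with a shrinking pending dict (popping keys as they are replaced) by a two-pass plan: pass 1 records each update key's first matching line index, pass 2 rebuilds the lines substituting exactly at those recorded positions, and the leftover appends are computed as a filter of the updates dict rather than as the surviving pending state.
import Mathlib
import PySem

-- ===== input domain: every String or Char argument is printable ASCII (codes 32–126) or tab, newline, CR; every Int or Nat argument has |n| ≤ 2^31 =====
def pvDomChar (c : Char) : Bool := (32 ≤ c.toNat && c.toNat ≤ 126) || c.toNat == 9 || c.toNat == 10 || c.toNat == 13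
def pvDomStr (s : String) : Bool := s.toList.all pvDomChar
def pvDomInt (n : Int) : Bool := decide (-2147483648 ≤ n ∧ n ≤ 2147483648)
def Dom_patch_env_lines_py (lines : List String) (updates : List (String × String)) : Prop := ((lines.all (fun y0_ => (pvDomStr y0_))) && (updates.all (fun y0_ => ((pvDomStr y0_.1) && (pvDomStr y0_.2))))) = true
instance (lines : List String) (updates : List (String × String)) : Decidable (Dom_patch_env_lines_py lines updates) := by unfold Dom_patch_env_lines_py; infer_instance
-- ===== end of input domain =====

-- B rebuilds the file in two passes (index each update key's first matching line, then
-- substitute at exactly those positions; leftovers are a filter of the updates dict) instead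
-- of A's single pass with a shrinking pending dict; same result, alternative decomposition.

-- ===== PORT A =====
-- _quote, a module-level helper both implementations use verbatim
def quotePy (value : String) : String :=
  if value = "" then ""
  else if value.toList.any (fun ch => [' ', '\t', '\n', '\r', '"', '\'', '\\', '#', '=', '$', '`'].contains ch) then
    "\"" ++ (PySem.Str.replace (PySem.Str.replace (PySem.Str.replace (PySem.Str.replace
      (PySem.Str.replace value "\\" "\\\\") "\"" "\\\"") "\r\n" "\\n") "\n" "\\n") "\r" "\\n") ++ "\""
  else value

-- body of A's `for raw in lines` loop, state = (pending, out)
def stepA (st : PySem.Dict String String × List String) (raw : String) :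
    PySem.Dict String String × List String :=
  let stripped := PySem.Str.strip raw
  if stripped = "" || PySem.Str.startswith stripped "#" || !(PySem.Str.isIn "=" stripped) then
    (st.1, st.2 ++ [raw])
  else
    let key := PySem.Str.strip (((PySem.Str.splitMax? stripped "=" 1).getD []).headD "")
    if st.1.contains key then
      -- pending.pop(key): guarded by `key in pending`, so getD's default is unreachable
      (st.1.erase key, st.2 ++ [key ++ "=" ++ quotePy (st.1.getD key "") ++ "\n"])
    else
      (st.1, st.2 ++ [raw])

-- trailing-newline enforcement: out[-1] = out[-1] + "\n"
def fixNlA (out : List String) : List String :=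
  if out ≠ [] ∧ PySem.Str.endswith (PySem.List.pyGetD out (-1) "") "\n" = false then
    PySem.List.pySetD out (-1) ((PySem.List.pyGetD out (-1) "") ++ "\n")
  else out

-- A's `if pending:` tail: optional comment line, then the leftover pairs
def appendPendingA (pending : List (String × String)) (out : List String) : List String :=
  if pending = [] then out
  else
    (if out ≠ [] ∧ PySem.Str.strip (PySem.List.pyGetD out (-1) "") ≠ "" then
        out ++ ["# Added by migrate_profile_to_uid.py\n"]
      else out)
    ++ pending.map (fun p => p.1 ++ "=" ++ quotePy p.2 ++ "\n")

def patch_env_lines_py (lines : List String) (updates : List (String × String)) : List String :=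
  let pending0 := updates.foldl (fun d p => d.insert p.1 p.2) PySem.Dict.empty
  let st := lines.foldl stepA (pending0, ([] : List String))
  appendPendingA st.1.items (fixNlA st.2)

-- ===== PORT B =====
-- B's _env_key helper
def envKeyB (raw : String) : Option String :=
  let stripped := PySem.Str.strip raw
  if stripped = "" || PySem.Str.startswith stripped "#" || !(PySem.Str.isIn "=" stripped) then none
  else some (PySem.Str.strip (((PySem.Str.splitMax? stripped "=" 1).getD []).headD ""))

-- pass 1 body: record the first line index of each key that is to be updated
def fiStepB (upd : PySem.Dict String String) (d : PySem.Dict String Int) (p : Int × String) :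
    PySem.Dict String Int :=
  match envKeyB p.2 with
  | some k => if upd.contains k && !(d.contains k) then d.insert k p.1 else d
  | none => d

-- pass 2 body: substitute exactly at the recorded positions
def outLineB (upd : PySem.Dict String String) (fi : PySem.Dict String Int) (p : Int × String) : String :=
  match envKeyB p.2 with
  | some k =>
      -- upd[k]: fi only records keys of upd, so getD's default is unreachable
      if fi.get? k = some p.1 then k ++ "=" ++ quotePy (upd.getD k "") ++ "\n" else p.2
  | none => p.2

def fixNlB (out : List String) : List String :=
  if out ≠ [] ∧ PySem.Str.endswith (PySem.List.pyGetD out (-1) "") "\n" = false then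
    PySem.List.pySetD out (-1) ((PySem.List.pyGetD out (-1) "") ++ "\n")
  else out

-- B's `if missing:` tail
def appendMissingB (missing : List (String × String)) (out : List String) : List String :=
  if missing = [] then out
  else
    (if out ≠ [] ∧ PySem.Str.strip (PySem.List.pyGetD out (-1) "") ≠ "" then
        out ++ ["# Added by migrate_profile_to_uid.py\n"]
      else out)
    ++ missing.map (fun p => p.1 ++ "=" ++ quotePy p.2 ++ "\n")

def patch_env_lines_py_alt (lines : List String) (updates : List (String × String)) : List String :=
  let upd := updates.foldl (fun d p => d.insert p.1 p.2) PySem.Dict.empty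
  let fi := (PySem.List.enumerate lines 0).foldl (fiStepB upd) PySem.Dict.empty
  let out := (PySem.List.enumerate lines 0).map (outLineB upd fi)
  appendMissingB (upd.items.filter (fun p => !(fi.contains p.1))) (fixNlB out)

-- ===== PRECONDITION & SPEC =====
def Spec_patch_env_lines_py (lines : List String) (updates : List (String × String)) (out : List String) : Prop := out = patch_env_lines_py_alt lines updates
instance (lines : List String) (updates : List (String × String)) (out : List String) : Decidable (Spec_patch_env_lines_py lines updates out) := by unfold Spec_patch_env_lines_py; infer_instance

-- ===== CLAIM (what is proved, stated in full; the proofs are below) =====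
def Claim_equal_patch_env_lines_py : Prop := ∀ (lines : List String) (updates : List (String × String)), Dom_patch_env_lines_py lines updates → Spec_patch_env_lines_py lines updates (patch_env_lines_py lines updates)

-- ===== LEMMAS AND PROOFS =====

-- A's inline classification of a line, named through B's key helper
theorem stepA_eq (st : PySem.Dict String String × List String) (raw : String) :
    stepA st raw =
      match envKeyB raw with
      | none => (st.1, st.2 ++ [raw])
      | some k =>
          if st.1.contains k then
            (st.1.erase k, st.2 ++ [k ++ "=" ++ quotePy (st.1.getD k "") ++ "\n"])
          else (st.1, st.2 ++ [raw]) := by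
  unfold stepA envKeyB
  by_cases h : (decide (PySem.Str.strip raw = "") || PySem.Str.startswith (PySem.Str.strip raw) "#"
      || !PySem.Str.isIn "=" (PySem.Str.strip raw)) = true
  · simp only [h, if_pos]
  · simp only [h, if_neg, Bool.not_eq_true]

-- lookups in a dict whose items are a key-filtered item list
theorem get?_mk_filter_of_true (l : List (String × String)) (g : String → Bool) (k : String)
    (hk : g k = false) :
    (PySem.Dict.mk (l.filter (fun p => !(g p.1)))).get? k = (PySem.Dict.mk l).get? k := by
  induction l with
  | nil => rfl
  | cons p t ih =>
    simp only [PySem.Dict.get?] at ih ⊢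
    by_cases hg : g p.1
    · have hpk : ¬ (p.1 == k) = true := by
        simp only [beq_iff_eq]; intro h; rw [h, hk] at hg; exact absurd hg (by simp)
      rw [List.filter_cons_of_neg (by simp [hg])]
      simp only [List.find?_cons, hpk]
      exact ih
    · rw [List.filter_cons_of_pos (by simp [hg])]
      by_cases hpk : (p.1 == k) = true
      · simp only [List.find?_cons, hpk]
      · simp only [List.find?_cons, hpk]; exact ih

theorem contains_mk_filter (l : List (String × String)) (g : String → Bool) (k : String) :
    (PySem.Dict.mk (l.filter (fun p => !(g p.1)))).contains k
      = (!(g k) && (PySem.Dict.mk l).contains k) := by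
  induction l with
  | nil => simp [PySem.Dict.contains]
  | cons p t ih =>
    simp only [PySem.Dict.contains] at ih ⊢
    by_cases hg : g p.1
    · rw [List.filter_cons_of_neg (by simp [hg]), ih, List.any_cons]
      by_cases hpk : (p.1 == k) = true
      · have : g k = true := by rw [← (beq_iff_eq.mp hpk)]; exact hg
        simp [this]
      · simp [hpk]
    · rw [List.filter_cons_of_pos (by simp [hg]), List.any_cons, List.any_cons, ih]
      by_cases hpk : (p.1 == k) = true
      · have : g k = false := by rw [← (beq_iff_eq.mp hpk)]; simpa using hg
        simp [hpk, this]
      · simp [hpk]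

-- the same two facts with the filter predicate spelled the way the ports spell it
theorem contains_mk_filterFi (l : List (String × String)) (fi : PySem.Dict String Int) (k : String) :
    (PySem.Dict.mk (l.filter (fun p => !(fi.contains p.1)))).contains k
      = (!(fi.contains k) && (PySem.Dict.mk l).contains k) :=
  contains_mk_filter l (fun x => fi.contains x) k

theorem get?_mk_filterFi (l : List (String × String)) (fi : PySem.Dict String Int) (k : String)
    (hk : fi.contains k = false) :
    (PySem.Dict.mk (l.filter (fun p => !(fi.contains p.1)))).get? k = (PySem.Dict.mk l).get? k :=
  get?_mk_filter_of_true l (fun x => fi.contains x) k hk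

-- B's pass 1 never overwrites an entry it already holds
theorem fiLoop_get?_mono (upd : PySem.Dict String String) (ps : List (Int × String)) :
    ∀ (d : PySem.Dict String Int) (k : String) (j : Int), d.get? k = some j →
      (ps.foldl (fiStepB upd) d).get? k = some j := by
  induction ps with
  | nil => intro d k j h; simpa using h
  | cons p t ih =>
    intro d k j h
    rw [List.foldl_cons]
    apply ih
    unfold fiStepB
    cases hek : envKeyB p.2 with
    | none => exact h
    | some k' =>
      simp only []
      by_cases hc : (upd.contains k' && !(d.contains k')) = true
      · rw [if_pos hc]
        have hk : k ≠ k' := by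
          intro he; subst he
          have : d.contains k = (d.get? k).isSome := PySem.Dict.contains_eq_isSome_get? d k
          rw [h] at this
          simp at hc
          rw [hc.2] at this
          simp at this
        rw [PySem.Dict.get?_insert_of_ne d p.1 hk]
        exact h
      · rw [if_neg hc]; exact h

-- B's pass 1 only ever records keys of upd
theorem fiLoop_contains_sub (upd : PySem.Dict String String) (ps : List (Int × String)) :
    ∀ (d : PySem.Dict String Int) (k : String),
      (ps.foldl (fiStepB upd) d).contains k = true →
      d.contains k = true ∨ upd.contains k = true := by
  induction ps with
  | nil => intro d k h; exact Or.inl (by simpa using h)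
  | cons p t ih =>
    intro d k h
    rw [List.foldl_cons] at h
    rcases ih _ k h with h2 | h2
    · unfold fiStepB at h2
      cases hek : envKeyB p.2 with
      | none => rw [hek] at h2; exact Or.inl h2
      | some k' =>
        rw [hek] at h2
        simp only [] at h2
        by_cases hc : (upd.contains k' && !(d.contains k')) = true
        · rw [if_pos hc] at h2
          rw [PySem.Dict.contains_insert] at h2
          rcases Bool.or_eq_true_iff.mp h2 with h3 | h3
          · right; rw [← (beq_iff_eq.mp h3)] at hc; exact (Bool.and_eq_true_iff.mp hc).1
          · exact Or.inl h3
        · rw [if_neg hc] at h2; exact Or.inl h2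
    · exact Or.inr h2

-- the invariant tying the two loop shapes together: A's surviving pending dict is upd filtered
-- by the keys B's pass 1 has recorded, and A's emitted lines are B's pass-2 substitutions
theorem loop_eq (upd : PySem.Dict String String) :
    ∀ (rest : List String) (i0 : Int) (fi : PySem.Dict String Int) (acc : List String),
      (∀ k j, fi.get? k = some j → j < i0) →
      (∀ k, fi.contains k = true → upd.contains k = true) →
      rest.foldl stepA (PySem.Dict.mk (upd.items.filter (fun p => !(fi.contains p.1))), acc)
        = (PySem.Dict.mk (upd.items.filter
              (fun p => !(((PySem.List.enumerate rest i0).foldl (fiStepB upd) fi).contains p.1))),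
           acc ++ (PySem.List.enumerate rest i0).map
              (outLineB upd ((PySem.List.enumerate rest i0).foldl (fiStepB upd) fi))) := by
  intro rest
  induction rest with
  | nil => intro i0 fi acc _ _; simp [PySem.List.enumerate_nil]
  | cons raw t ih =>
    intro i0 fi acc hlt hsub
    rw [PySem.List.enumerate_cons, List.foldl_cons, List.foldl_cons, stepA_eq, List.map_cons]
    cases hek : envKeyB raw with
    | none =>
      simp only [fiStepB, hek]
      rw [ih (i0 + 1) fi (acc ++ [raw])
        (fun k j h => lt_trans (hlt k j h) (by omega)) hsub]
      simp only [outLineB, hek, List.append_assoc, List.singleton_append]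
    | some k =>
      simp only []
      rw [contains_mk_filterFi]
      by_cases hc : (upd.contains k && !(fi.contains k)) = true
      · have hfik : fi.contains k = false := by
          rcases Bool.and_eq_true_iff.mp hc with ⟨_, h2⟩; simpa using h2
        have hcont : (!(fi.contains k) && (PySem.Dict.mk upd.items).contains k) = true := by
          rw [hfik]
          simp only [Bool.not_false, Bool.true_and]
          exact (Bool.and_eq_true_iff.mp hc).1
        rw [if_pos hcont]
        have hval : (PySem.Dict.mk (upd.items.filter (fun p => !(fi.contains p.1)))).getD k ""
            = upd.getD k "" := by
          unfold PySem.Dict.getD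
          rw [get?_mk_filterFi _ _ _ hfik]
        have herase : (PySem.Dict.mk (upd.items.filter (fun p => !(fi.contains p.1)))).erase k
            = PySem.Dict.mk (upd.items.filter (fun p => !((fi.insert k i0).contains p.1))) := by
          unfold PySem.Dict.erase
          simp only [List.filter_filter]
          congr 1
          apply List.filter_congr
          intro p _
          rw [PySem.Dict.contains_insert]
          cases h1 : fi.contains p.1 <;> cases h2 : (p.1 == k) <;> simp
        rw [hval, herase]
        have hstep : fiStepB upd fi (i0, raw) = fi.insert k i0 := by
          unfold fiStepB; rw [hek]; simp only [if_pos hc]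
        rw [hstep]
        have hget : ((PySem.List.enumerate t (i0 + 1)).foldl (fiStepB upd) (fi.insert k i0)).get? k
            = some i0 :=
          fiLoop_get?_mono upd _ _ _ _ (by simp : (fi.insert k i0).get? k = some i0)
        rw [ih (i0 + 1) (fi.insert k i0) (acc ++ [k ++ "=" ++ quotePy (upd.getD k "") ++ "\n"])
          (by
            intro k' j h
            rw [PySem.Dict.get?_insert] at h
            by_cases hk' : k' = k
            · rw [if_pos hk'] at h; injection h with h; omega
            · rw [if_neg hk'] at h; have := hlt k' j h; omega)
          (by
            intro k' h
            rw [PySem.Dict.contains_insert] at h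
            rcases Bool.or_eq_true_iff.mp h with h3 | h3
            · rw [(beq_iff_eq.mp h3)]; exact (Bool.and_eq_true_iff.mp hc).1
            · exact hsub k' h3)]
        simp [outLineB, hek, hget, List.append_assoc]
      · have hcont : ¬ ((!(fi.contains k) && (PySem.Dict.mk upd.items).contains k) = true) := by
          intro h
          rcases Bool.and_eq_true_iff.mp h with ⟨h1, h2⟩
          exact hc (by simp_all)
        rw [if_neg hcont]
        have hstep : fiStepB upd fi (i0, raw) = fi := by
          unfold fiStepB; rw [hek]; simp only [if_neg hc]
        rw [hstep]
        have hget : ¬ (((PySem.List.enumerate t (i0 + 1)).foldl (fiStepB upd) fi).get? k = some i0) := by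
          intro h
          by_cases hfik : fi.contains k = true
          · rw [PySem.Dict.contains_eq_isSome_get?] at hfik
            rcases Option.isSome_iff_exists.mp hfik with ⟨j, hj⟩
            have := fiLoop_get?_mono upd (PySem.List.enumerate t (i0 + 1)) fi k j hj
            rw [this] at h
            have hji := hlt k j hj
            have : j = i0 := by injection h
            omega
          · have hcontF : ((PySem.List.enumerate t (i0 + 1)).foldl (fiStepB upd) fi).contains k = true := by
              rw [PySem.Dict.contains_eq_isSome_get?, h]; rfl
            rcases fiLoop_contains_sub upd _ _ _ hcontF with h3 | h3
            · exact hfik h3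
            · exact hc (by simp_all)
        rw [ih (i0 + 1) fi (acc ++ [raw])
          (fun k' j h => lt_trans (hlt k' j h) (by omega)) hsub]
        simp [outLineB, hek, hget, List.append_assoc]

-- ===== VERDICT (by name: the statement is the Claim_ definition above) =====
theorem patch_env_lines_py_spec : Claim_equal_patch_env_lines_py := by
  intro lines updates _
  unfold Spec_patch_env_lines_py patch_env_lines_py patch_env_lines_py_alt
  have hinit : (updates.foldl (fun d p => d.insert p.1 p.2) PySem.Dict.empty
      : PySem.Dict String String)
      = PySem.Dict.mk ((updates.foldl (fun d p => d.insert p.1 p.2) PySem.Dict.empty).items.filter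
          (fun p => !((PySem.Dict.empty : PySem.Dict String Int).contains p.1))) := by
    simp [PySem.Dict.contains_empty]
  simp only []
  conv_lhs => rw [hinit]
  rw [loop_eq (updates.foldl (fun d p => d.insert p.1 p.2) PySem.Dict.empty) lines 0
      PySem.Dict.empty []
      (by intro k j h; simp [PySem.Dict.get?_empty] at h)
      (by intro k h; simp [PySem.Dict.contains_empty] at h)]
  simp only [List.nil_append]
  unfold appendPendingA appendMissingB fixNlA fixNlB
  rfl
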